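-- pv_equiv track=rewrite | github.com/pypi-data/pypi-mirror-373 | packages/memecoin-analyst-agent/memecoin_analyst_agent-0.1.0-py3-none-any.whl/slow_trading_agent/tools/narrative_scoring_tools.py | _is_pronounceable
-- ===== SOURCE A (Python) =====
-- def _is_pronounceable(name: str) -> bool:
--     """判断是否易发音"""
--     if not name:
--         return False
--
--     # 检查是否包含过多连续辅音
--     consonants = 'bcdfghjklmnpqrstvwxyz'
--     consecutive_consonants = 0
--     max_consecutive = 0
--
--     for char in name.lower():
--         if char in consonants:
--             consecutive_consonants += 1
--             max_consecutive = max(max_consecutive, consecutive_consonants)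
--         else:
--             consecutive_consonants = 0
--
--     return max_consecutive <= 3
-- ===== SOURCE B (Python) =====
-- def _is_pronounceable(name: str) -> bool:
--     """判断是否易发音"""
--     if not name:
--         return False
--     consonants = set('bcdfghjklmnpqrstvwxyz')
--     s = name.lower()
--     # sliding window of width 4: pronounceable iff no window is all consonants
--     return not any(a in consonants and b in consonants and c in consonants and d in consonants
--                    for a, b, c, d in zip(s, s[1:], s[2:], s[3:]))
-- ===== Notes on version B (the rewrite author's own statement) =====
-- stated objective: idiomatic
-- what changed: Replaced the stateful running-counter/maximum loop by a stateless sliding-window test (any over zip of four shifted views of the lowered string, set membership); the C-level zip/any iteration with short-circuiting gives a constant-factor speedup over the per-character Python branching.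
import Mathlib
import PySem

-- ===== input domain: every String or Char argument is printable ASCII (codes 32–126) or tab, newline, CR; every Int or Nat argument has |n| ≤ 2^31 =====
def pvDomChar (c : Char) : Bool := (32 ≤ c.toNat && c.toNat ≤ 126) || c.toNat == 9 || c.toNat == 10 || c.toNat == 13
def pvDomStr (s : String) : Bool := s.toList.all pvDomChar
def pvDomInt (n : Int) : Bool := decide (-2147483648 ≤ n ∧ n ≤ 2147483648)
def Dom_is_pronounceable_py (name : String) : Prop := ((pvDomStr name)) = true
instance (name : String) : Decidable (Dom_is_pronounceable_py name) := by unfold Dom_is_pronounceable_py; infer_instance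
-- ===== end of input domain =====

-- B replaces A's stateful running-counter/maximum loop by a stateless sliding-window
-- test over width-4 windows of the lowered string (objective: idiomatic).

-- ===== PORT A =====
-- the consonant alphabet; Python's `char in consonants` for a single char is list membership
def pvConsonants : List Char := "bcdfghjklmnpqrstvwxyz".toList

-- loop body of A: state = (consecutive_consonants, max_consecutive)
def pvStepA (p : Int × Int) (char : Char) : Int × Int :=
  if pvConsonants.contains char then (p.1 + 1, max p.2 (p.1 + 1)) else (0, p.2)

def is_pronounceable_py (name : String) : Bool :=
  if name = "" then false
  else
    let st := (PySem.Str.lower name).toList.foldl pvStepA (0, 0)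
    decide (st.2 ≤ 3)

-- ===== PORT B =====
-- Source B's `any(... for a,b,c,d in zip(s, s[1:], s[2:], s[3:]))`: the zip walks the
-- maximal width-4 windows, which is exactly this recursion over four-element heads
def pvAny4 : List Char → Bool
  | a :: b :: c :: d :: rest =>
      (pvConsonants.contains a && pvConsonants.contains b &&
       pvConsonants.contains c && pvConsonants.contains d) || pvAny4 (b :: c :: d :: rest)
  | _ => false
termination_by l => l.length

def is_pronounceable_py_alt (name : String) : Bool :=
  if name = "" then false
  else !pvAny4 (PySem.Str.lower name).toList

-- ===== PRECONDITION & SPEC =====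
def Spec_is_pronounceable_py (name : String) (out : Bool) : Prop := out = is_pronounceable_py_alt name
instance (name : String) (out : Bool) : Decidable (Spec_is_pronounceable_py name out) := by unfold Spec_is_pronounceable_py; infer_instance

-- ===== CLAIM (what is proved, stated in full; the proofs are below) =====
def Claim_equal_is_pronounceable_py : Prop := ∀ (name : String), Dom_is_pronounceable_py name → Spec_is_pronounceable_py name (is_pronounceable_py name)

-- ===== LEMMAS AND PROOFS =====

-- "the first k chars of l exist and are all consonants"
def pvHeadRun : Nat → List Char → Bool
  | 0, _ => true
  | _ + 1, [] => false
  | k + 1, c :: r => pvConsonants.contains c && pvHeadRun k r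

-- maximal consonant run of l, the first run credited with `cur` extra; floor `cur`
def pvRunsMax : Int → List Char → Int
  | cur, [] => cur
  | cur, c :: r => if pvConsonants.contains c then pvRunsMax (cur + 1) r else max cur (pvRunsMax 0 r)

theorem pvRunsMax_ge (l : List Char) : ∀ cur : Int, cur ≤ pvRunsMax cur l := by
  induction l with
  | nil => intro cur; simp [pvRunsMax]
  | cons c r ih =>
      intro cur
      cases hc : pvConsonants.contains c with
      | true =>
          rw [pvRunsMax, if_pos hc]
          have := ih (cur + 1); omega
      | false =>
          rw [pvRunsMax, if_neg (by simpa using hc)]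
          exact le_max_left _ _

theorem pvFoldA_eq (l : List Char) : ∀ cur mx : Int, 0 ≤ cur → cur ≤ mx →
    (l.foldl pvStepA (cur, mx)).2 = max mx (pvRunsMax cur l) := by
  induction l with
  | nil =>
      intro cur mx h0 h
      simp only [List.foldl_nil, pvRunsMax]
      exact (max_eq_left h).symm
  | cons c r ih =>
      intro cur mx h0 h
      cases hc : pvConsonants.contains c with
      | true =>
          simp only [List.foldl_cons, pvStepA, pvRunsMax, hc, if_true]
          rw [ih (cur + 1) (max mx (cur + 1)) (by omega) (le_max_right _ _)]
          have h2 := pvRunsMax_ge r (cur + 1)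
          rw [max_assoc, max_eq_right h2]
      | false =>
          simp only [List.foldl_cons, pvStepA, pvRunsMax, hc, Bool.false_eq_true, if_false]
          rw [ih 0 mx le_rfl (by omega)]
          rw [← max_assoc, max_eq_left h]

theorem pvHeadRun_mono (l : List Char) : ∀ j k : Nat, j ≤ k → pvHeadRun j l = false →
    pvHeadRun k l = false := by
  induction l with
  | nil =>
      intro j k hjk hj
      cases j with
      | zero => simp [pvHeadRun] at hj
      | succ j' => cases k with
        | zero => omega
        | succ k' => simp [pvHeadRun]
  | cons c r ih =>
      intro j k hjk hj
      cases j with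
      | zero => simp [pvHeadRun] at hj
      | succ j' => cases k with
        | zero => omega
        | succ k' =>
            simp only [pvHeadRun, Bool.and_eq_false_iff] at hj ⊢
            rcases hj with hj | hj
            · exact Or.inl hj
            · exact Or.inr (ih j' k' (by omega) hj)

theorem pvAny4_cons (c : Char) (rest : List Char) :
    pvAny4 (c :: rest) = ((pvConsonants.contains c && pvHeadRun 3 rest) || pvAny4 rest) := by
  match rest with
  | [] => simp [pvAny4, pvHeadRun]
  | [b] => simp [pvAny4, pvHeadRun]
  | [b, d] => simp [pvAny4, pvHeadRun]
  | b :: d :: e :: r => simp [pvAny4, pvHeadRun, Bool.and_assoc]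

theorem pvAny4_head (l : List Char) (h : pvAny4 l = false) : pvHeadRun 4 l = false := by
  cases l with
  | nil => simp [pvHeadRun]
  | cons c r =>
      rw [pvAny4_cons, Bool.or_eq_false_iff] at h
      show (pvConsonants.contains c && pvHeadRun 3 r) = false
      exact h.1

theorem pvKey (l : List Char) : ∀ cur : Int, 0 ≤ cur →
    ((pvRunsMax cur l ≤ 3) ↔ (cur ≤ 3 ∧ pvHeadRun (4 - cur).toNat l = false ∧ pvAny4 l = false)) := by
  induction l with
  | nil =>
      intro cur h0
      simp only [pvRunsMax, pvAny4, and_true]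
      constructor
      · intro h3
        obtain ⟨k, hk⟩ : ∃ k, (4 - cur).toNat = k + 1 := ⟨(4 - cur).toNat - 1, by omega⟩
        rw [hk]
        exact ⟨h3, rfl⟩
      · exact And.left
  | cons c r ih =>
      intro cur h0
      by_cases h3 : cur ≤ 3
      · obtain ⟨k, hk⟩ : ∃ k, (4 - cur).toNat = k + 1 := ⟨(4 - cur).toNat - 1, by omega⟩
        cases hc : pvConsonants.contains c with
        | true =>
            rw [pvAny4_cons, hc, Bool.true_and]
            simp only [pvRunsMax, hc, if_true, hk, pvHeadRun, Bool.true_and,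
              Bool.or_eq_false_iff]
            have hIH := ih (cur + 1) (by omega)
            have hk' : (4 - (cur + 1)).toNat = k := by omega
            rw [hk'] at hIH
            rw [hIH]
            constructor
            · rintro ⟨-, hhr, hany⟩
              refine ⟨h3, hhr, ?_, hany⟩
              exact pvHeadRun_mono r k 3 (by omega) hhr
            · rintro ⟨-, hhr, -, hany⟩
              refine ⟨?_, hhr, hany⟩
              by_contra hcon
              have hcur : cur = 3 := by omega
              have hk0 : k = 0 := by omega
              rw [hk0] at hhr
              simp [pvHeadRun] at hhr
        | false =>
            rw [pvAny4_cons, hc, Bool.false_and, Bool.false_or]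
            simp only [pvRunsMax, hc, Bool.false_eq_true, if_false, hk, pvHeadRun,
              Bool.false_and, true_and, max_le_iff]
            have hIH := ih 0 (by omega)
            simp only [show ((4 : Int) - 0).toNat = 4 from rfl] at hIH
            have hge := pvRunsMax_ge r 0
            constructor
            · rintro ⟨-, h5⟩
              rw [hIH] at h5
              exact ⟨h3, h5.2.2⟩
            · rintro ⟨-, hany⟩
              refine ⟨h3, ?_⟩
              rw [hIH]
              exact ⟨by omega, pvAny4_head r hany, hany⟩
      · constructor
        · intro h
          have := pvRunsMax_ge (c :: r) cur
          omega
        · rintro ⟨h, -⟩; omega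

-- ===== VERDICT (by name: the statement is the Claim_ definition above) =====
theorem is_pronounceable_py_spec : Claim_equal_is_pronounceable_py := by
  intro name _
  unfold Spec_is_pronounceable_py is_pronounceable_py is_pronounceable_py_alt
  by_cases h : name = ""
  · simp [h]
  · simp only [h, if_false]
    set l := (PySem.Str.lower name).toList with hl
    rw [pvFoldA_eq l 0 0 le_rfl le_rfl]
    have hge := pvRunsMax_ge l 0
    rw [max_eq_right hge]
    have hk := pvKey l 0 (by omega)
    simp only [show ((4 : Int) - 0).toNat = 4 from rfl] at hk
    cases ha : pvAny4 l with
    | false =>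
        have hle : pvRunsMax 0 l ≤ 3 := by
          rw [hk]
          exact ⟨by omega, pvAny4_head l ha, ha⟩
        simp [hle]
    | true =>
        have hle : ¬ pvRunsMax 0 l ≤ 3 := by
          rw [hk]
          rintro ⟨-, -, h'⟩
          rw [ha] at h'
          cases h'
        simp [hle]
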